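-- pv_equiv track=rewrite | github.com/noahostle/SPEAR | Attacks/full_key_recovery/ladder/ladder.py | lane_perm_from_signature
-- ===== SOURCE A (Python) =====
-- from typing import Dict, List, Optional, Sequence, Tuple
--
-- S2 = [6, 10, 15, 4, 14, 13, 9, 2, 1, 7, 12, 11, 0, 3, 5, 8]
--
-- def signature_to_lane_betas(signature: Tuple[int, int, int, int]) -> Tuple[int, int, int, int]:
--     return signature[0], signature[2], signature[1], signature[3]
--
-- def lane_perm_from_signature(signature: Tuple[int, int, int, int]) -> Tuple[int, ...]:
--     beta0, beta1, beta2, beta3 = signature_to_lane_betas(signature)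
--     perm = []
--     for b in range(16):
--         v2 = S2[b ^ beta0]
--         v3 = S2[v2 ^ beta1]
--         v4 = S2[v3 ^ beta2]
--         v5 = S2[v4 ^ beta3]
--         out = S2[v5 ^ beta0 ^ beta1] ^ beta2 ^ beta3
--         perm.append(out & 0xF)
--     return tuple(perm)
-- ===== SOURCE B (Python) =====
-- S2 = [6, 10, 15, 4, 14, 13, 9, 2, 1, 7, 12, 11, 0, 3, 5, 8]
--
-- def lane_perm_from_signature(signature):
--     # Work backwards with the inverse S-box: for each output value y, compute the
--     # unique lane index x that maps to it, and scatter y into perm[x].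
--     b0, b2, b1, b3 = (x & 0xF for x in signature)
--     inv = [0] * 16
--     for i, v in enumerate(S2):
--         inv[v] = i
--     perm = [0] * 16
--     for y in range(16):
--         x = inv[y ^ b2 ^ b3] ^ b0 ^ b1
--         x = inv[x] ^ b3
--         x = inv[x] ^ b2
--         x = inv[x] ^ b1
--         x = inv[x] ^ b0
--         perm[x] = y
--     return tuple(perm)
-- ===== Notes on version B (the rewrite author's own statement) =====
-- stated objective: alternative
-- what changed: B runs the cipher chain backwards: it builds the inverse S-box once and, for each output value y, computes the unique lane index x whose forward chain yields y, scattering y into perm[x], instead of A's forward per-index S-box chain.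
import Mathlib
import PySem

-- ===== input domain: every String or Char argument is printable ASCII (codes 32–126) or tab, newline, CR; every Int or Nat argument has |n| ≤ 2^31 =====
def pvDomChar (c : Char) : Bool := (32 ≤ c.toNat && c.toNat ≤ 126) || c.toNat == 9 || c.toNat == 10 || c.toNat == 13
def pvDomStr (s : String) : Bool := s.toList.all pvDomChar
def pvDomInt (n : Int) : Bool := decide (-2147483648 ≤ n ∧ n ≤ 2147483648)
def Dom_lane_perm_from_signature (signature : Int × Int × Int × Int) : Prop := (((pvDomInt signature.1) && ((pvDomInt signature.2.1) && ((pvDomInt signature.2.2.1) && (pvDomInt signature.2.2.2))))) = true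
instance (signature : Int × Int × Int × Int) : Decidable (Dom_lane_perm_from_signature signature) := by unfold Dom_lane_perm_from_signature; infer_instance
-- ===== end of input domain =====

-- B inverts the S-box chain: it builds the inverse S-box and, for each output value y,
-- computes backwards the unique lane index mapping to y, scattering y into place
-- (alternative algorithm, same constant cost).

-- ===== PORT A =====
def pvS2 : List Int := [6, 10, 15, 4, 14, 13, 9, 2, 1, 7, 12, 11, 0, 3, 5, 8]

-- S2[i]: Python indexing (negative wraps, out-of-range raises → none; Pre_ guarantees some)
def pvS2get (i : Int) : Int := (PySem.List.pyGet? pvS2 i).getD 0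

def lane_perm_from_signature (signature : Int × Int × Int × Int) : List Int :=
  let beta0 := signature.1
  let beta1 := signature.2.2.1
  let beta2 := signature.2.1
  let beta3 := signature.2.2.2
  (PySem.List.pyRange 0 16 1).foldl (fun perm b =>
    let v2 := pvS2get (PySem.Int.bxor b beta0)
    let v3 := pvS2get (PySem.Int.bxor v2 beta1)
    let v4 := pvS2get (PySem.Int.bxor v3 beta2)
    let v5 := pvS2get (PySem.Int.bxor v4 beta3)
    let out := PySem.Int.bxor (PySem.Int.bxor (pvS2get (PySem.Int.bxor (PySem.Int.bxor v5 beta0) beta1)) beta2) beta3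
    perm ++ [PySem.Int.band out 0xF]) []

-- ===== PORT B =====
-- l[i] for the nonnegative in-range indices B produces (pyGet? is Python-exact)
def pvGetL (l : List Int) (i : Int) : Int := (PySem.List.pyGet? l i).getD 0

def lane_perm_from_signature_alt (signature : Int × Int × Int × Int) : List Int :=
  let b0 := PySem.Int.band signature.1 15
  let b2 := PySem.Int.band signature.2.1 15
  let b1 := PySem.Int.band signature.2.2.1 15
  let b3 := PySem.Int.band signature.2.2.2 15
  -- inv[v] = i for i, v in enumerate(S2)
  let inv := (PySem.List.enumerate pvS2).foldl
    (fun inv iv => PySem.List.pySetD inv iv.2 iv.1) (List.replicate 16 (0 : Int))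
  (PySem.List.pyRange 0 16 1).foldl (fun perm y =>
    let x1 := PySem.Int.bxor (PySem.Int.bxor (pvGetL inv (PySem.Int.bxor (PySem.Int.bxor y b2) b3)) b0) b1
    let x2 := PySem.Int.bxor (pvGetL inv x1) b3
    let x3 := PySem.Int.bxor (pvGetL inv x2) b2
    let x4 := PySem.Int.bxor (pvGetL inv x3) b1
    let x5 := PySem.Int.bxor (pvGetL inv x4) b0
    PySem.List.pySetD perm x5 y) (List.replicate 16 (0 : Int))

-- ===== PRECONDITION & SPEC =====
-- Pre_: exactly the signatures on which A returns; any component outside [-16, 15]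
-- makes some S2 index leave Python's valid index range [-16, 15] and A raises IndexError.
def Pre_lane_perm_from_signature (signature : Int × Int × Int × Int) : Prop :=
  (-16 ≤ signature.1 ∧ signature.1 ≤ 15) ∧
  (-16 ≤ signature.2.1 ∧ signature.2.1 ≤ 15) ∧
  (-16 ≤ signature.2.2.1 ∧ signature.2.2.1 ≤ 15) ∧
  (-16 ≤ signature.2.2.2 ∧ signature.2.2.2 ≤ 15)
instance (signature : Int × Int × Int × Int) : Decidable (Pre_lane_perm_from_signature signature) := by
  unfold Pre_lane_perm_from_signature; infer_instance

def pvWitness_lane_perm_from_signature : (Int × Int × Int × Int) := (3, 0, -5, 12)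

def Spec_lane_perm_from_signature (signature : Int × Int × Int × Int) (out : List Int) : Prop := out = lane_perm_from_signature_alt signature
instance (signature : Int × Int × Int × Int) (out : List Int) : Decidable (Spec_lane_perm_from_signature signature out) := by unfold Spec_lane_perm_from_signature; infer_instance

-- ===== CLAIM (what is proved, stated in full; the proofs are below) =====
def Claim_equal_lane_perm_from_signature : Prop := ∀ (signature : Int × Int × Int × Int), Dom_lane_perm_from_signature signature → Pre_lane_perm_from_signature signature → Spec_lane_perm_from_signature signature (lane_perm_from_signature signature)

-- ===== LEMMAS AND PROOFS =====

-- Abbreviations for the proofs: the masked forward chain (A, elementwise) and the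
-- masked backward chain (B, elementwise), and S2's inverse table as a literal.
def pvInv : List Int := [12, 8, 7, 13, 3, 14, 0, 9, 15, 6, 1, 11, 10, 5, 4, 2]

def pvSi (x : Int) : Int := pvGetL pvInv x

def pvFwd (m0 m1 m2 m3 b : Int) : Int :=
  PySem.Int.bxor (PySem.Int.bxor
    (pvS2get (PySem.Int.bxor (PySem.Int.bxor
      (pvS2get (PySem.Int.bxor
        (pvS2get (PySem.Int.bxor
          (pvS2get (PySem.Int.bxor
            (pvS2get (PySem.Int.bxor b m0)) m1)) m2)) m3)) m0) m1)) m2) m3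

def pvBwd (m0 m1 m2 m3 y : Int) : Int :=
  let x1 := PySem.Int.bxor (PySem.Int.bxor (pvSi (PySem.Int.bxor (PySem.Int.bxor y m2) m3)) m0) m1
  let x2 := PySem.Int.bxor (pvSi x1) m3
  let x3 := PySem.Int.bxor (pvSi x2) m2
  let x4 := PySem.Int.bxor (pvSi x3) m1
  PySem.Int.bxor (pvSi x4) m0

-- integer-interval transfer helpers
theorem pv_ball32 {P : Int → Prop} (h : ∀ n : Nat, n < 32 → P ((n : Int) - 16))
    (w : Int) (h1 : -16 ≤ w) (h2 : w ≤ 15) : P w := by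
  have h3 := h (w + 16).toNat (by omega)
  rwa [show (((w + 16).toNat : Int) - 16) = w by omega] at h3

theorem pv_ball16 {P : Int → Prop} (h : ∀ n : Nat, n < 16 → P (n : Int))
    (w : Int) (h1 : 0 ≤ w) (h2 : w < 16) : P w := by
  have h3 := h w.toNat (by omega)
  rwa [show ((w.toNat : Nat) : Int) = w by omega] at h3

-- masks land in [0,16)
theorem pv_mask_range : ∀ β : Int, -16 ≤ β → β ≤ 15 →
    0 ≤ PySem.Int.band β 15 ∧ PySem.Int.band β 15 < 16 := by
  exact pv_ball32 (P := fun β => 0 ≤ PySem.Int.band β 15 ∧ PySem.Int.band β 15 < 16) (by decide)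

-- xor of a nibble with a valid Python index stays a valid Python index
theorem pv_xor_closure : ∀ w : Int, -16 ≤ w → w ≤ 15 → ∀ β : Int, -16 ≤ β → β ≤ 15 →
    -16 ≤ PySem.Int.bxor w β ∧ PySem.Int.bxor w β ≤ 15 := by
  exact pv_ball32
    (P := fun w => ∀ β : Int, -16 ≤ β → β ≤ 15 → -16 ≤ PySem.Int.bxor w β ∧ PySem.Int.bxor w β ≤ 15)
    (fun n hn => pv_ball32 (by revert n hn; decide))

-- Python's wrapped S2[w ^ β] equals the masked lookup
theorem pv_snorm : ∀ w : Int, -16 ≤ w → w ≤ 15 → ∀ β : Int, -16 ≤ β → β ≤ 15 →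
    pvS2get (PySem.Int.bxor w β) = pvS2get (PySem.Int.bxor (PySem.Int.band w 15) (PySem.Int.band β 15)) := by
  exact pv_ball32
    (P := fun w => ∀ β : Int, -16 ≤ β → β ≤ 15 →
      pvS2get (PySem.Int.bxor w β) = pvS2get (PySem.Int.bxor (PySem.Int.band w 15) (PySem.Int.band β 15)))
    (fun n hn => pv_ball32 (by revert n hn; decide))

-- masking distributes over xor on this range
theorem pv_band_xor : ∀ w : Int, -16 ≤ w → w ≤ 15 → ∀ β : Int, -16 ≤ β → β ≤ 15 →
    PySem.Int.band (PySem.Int.bxor w β) 15 = PySem.Int.bxor (PySem.Int.band w 15) (PySem.Int.band β 15) := by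
  exact pv_ball32
    (P := fun w => ∀ β : Int, -16 ≤ β → β ≤ 15 →
      PySem.Int.band (PySem.Int.bxor w β) 15 = PySem.Int.bxor (PySem.Int.band w 15) (PySem.Int.band β 15))
    (fun n hn => pv_ball32 (by revert n hn; decide))

theorem pv_band_id : ∀ x : Int, 0 ≤ x → x < 16 → PySem.Int.band x 15 = x := by
  exact pv_ball16 (P := fun x => PySem.Int.band x 15 = x) (by decide)

-- nibble facts
theorem pv_s_range : ∀ x : Int, 0 ≤ x → x < 16 → 0 ≤ pvS2get x ∧ pvS2get x < 16 := by
  exact pv_ball16 (P := fun x => 0 ≤ pvS2get x ∧ pvS2get x < 16) (by decide)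

theorem pv_si_range : ∀ x : Int, 0 ≤ x → x < 16 → 0 ≤ pvSi x ∧ pvSi x < 16 := by
  exact pv_ball16 (P := fun x => 0 ≤ pvSi x ∧ pvSi x < 16) (by decide)

theorem pv_xor_small : ∀ x : Int, 0 ≤ x → x < 16 → ∀ m : Int, 0 ≤ m → m < 16 →
    0 ≤ PySem.Int.bxor x m ∧ PySem.Int.bxor x m < 16 := by
  exact pv_ball16
    (P := fun x => ∀ m : Int, 0 ≤ m → m < 16 → 0 ≤ PySem.Int.bxor x m ∧ PySem.Int.bxor x m < 16)
    (fun n hn => pv_ball16 (by revert n hn; decide))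

theorem pv_si_s : ∀ x : Int, 0 ≤ x → x < 16 → pvSi (pvS2get x) = x := by
  exact pv_ball16 (P := fun x => pvSi (pvS2get x) = x) (by decide)

theorem pv_s_si : ∀ x : Int, 0 ≤ x → x < 16 → pvS2get (pvSi x) = x := by
  exact pv_ball16 (P := fun x => pvS2get (pvSi x) = x) (by decide)

theorem pv_xor_cancel2 : ∀ x : Int, 0 ≤ x → x < 16 → ∀ m : Int, 0 ≤ m → m < 16 →
    PySem.Int.bxor (PySem.Int.bxor x m) m = x := by
  exact pv_ball16
    (P := fun x => ∀ m : Int, 0 ≤ m → m < 16 → PySem.Int.bxor (PySem.Int.bxor x m) m = x)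
    (fun n hn => pv_ball16 (by revert n hn; decide))

theorem pv_xor_cancel4 : ∀ x : Int, 0 ≤ x → x < 16 → ∀ m0 : Int, 0 ≤ m0 → m0 < 16 →
    ∀ m1 : Int, 0 ≤ m1 → m1 < 16 →
    PySem.Int.bxor (PySem.Int.bxor (PySem.Int.bxor (PySem.Int.bxor x m0) m1) m0) m1 = x := by
  exact pv_ball16
    (P := fun x => ∀ m0 : Int, 0 ≤ m0 → m0 < 16 → ∀ m1 : Int, 0 ≤ m1 → m1 < 16 →
      PySem.Int.bxor (PySem.Int.bxor (PySem.Int.bxor (PySem.Int.bxor x m0) m1) m0) m1 = x)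
    (fun n hn => pv_ball16 (fun a ha => pv_ball16 (by revert n hn a ha; decide)))

-- A's loop body equals the masked forward chain
theorem pv_fA_eq (β0 β1 β2 β3 b : Int)
    (h0 : -16 ≤ β0 ∧ β0 ≤ 15) (h1 : -16 ≤ β1 ∧ β1 ≤ 15)
    (h2 : -16 ≤ β2 ∧ β2 ≤ 15) (h3 : -16 ≤ β3 ∧ β3 ≤ 15)
    (hb : 0 ≤ b ∧ b < 16) :
    PySem.Int.band (PySem.Int.bxor (PySem.Int.bxor
      (pvS2get (PySem.Int.bxor (PySem.Int.bxor
        (pvS2get (PySem.Int.bxor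
          (pvS2get (PySem.Int.bxor
            (pvS2get (PySem.Int.bxor
              (pvS2get (PySem.Int.bxor b β0)) β1)) β2)) β3)) β0) β1)) β2) β3) 15
    = pvFwd (PySem.Int.band β0 15) (PySem.Int.band β1 15)
        (PySem.Int.band β2 15) (PySem.Int.band β3 15) b := by
  have hm0 := pv_mask_range β0 h0.1 h0.2
  have hm1 := pv_mask_range β1 h1.1 h1.2
  have hm2 := pv_mask_range β2 h2.1 h2.2
  have hm3 := pv_mask_range β3 h3.1 h3.2
  simp only [pvFwd]
  rw [pv_snorm b (by omega) (by omega) β0 h0.1 h0.2, pv_band_id b hb.1 hb.2]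
  set v2 := pvS2get (PySem.Int.bxor b (PySem.Int.band β0 15)) with hv2
  have rv2 : 0 ≤ v2 ∧ v2 < 16 := by
    rw [hv2]
    exact pv_s_range _ (pv_xor_small b hb.1 hb.2 _ hm0.1 hm0.2).1
      (pv_xor_small b hb.1 hb.2 _ hm0.1 hm0.2).2
  rw [pv_snorm v2 (by omega) (by omega) β1 h1.1 h1.2, pv_band_id v2 rv2.1 rv2.2]
  set v3 := pvS2get (PySem.Int.bxor v2 (PySem.Int.band β1 15)) with hv3
  have rv3 : 0 ≤ v3 ∧ v3 < 16 := by
    rw [hv3]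
    exact pv_s_range _ (pv_xor_small v2 rv2.1 rv2.2 _ hm1.1 hm1.2).1
      (pv_xor_small v2 rv2.1 rv2.2 _ hm1.1 hm1.2).2
  rw [pv_snorm v3 (by omega) (by omega) β2 h2.1 h2.2, pv_band_id v3 rv3.1 rv3.2]
  set v4 := pvS2get (PySem.Int.bxor v3 (PySem.Int.band β2 15)) with hv4
  have rv4 : 0 ≤ v4 ∧ v4 < 16 := by
    rw [hv4]
    exact pv_s_range _ (pv_xor_small v3 rv3.1 rv3.2 _ hm2.1 hm2.2).1
      (pv_xor_small v3 rv3.1 rv3.2 _ hm2.1 hm2.2).2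
  rw [pv_snorm v4 (by omega) (by omega) β3 h3.1 h3.2, pv_band_id v4 rv4.1 rv4.2]
  set v5 := pvS2get (PySem.Int.bxor v4 (PySem.Int.band β3 15)) with hv5
  have rv5 : 0 ≤ v5 ∧ v5 < 16 := by
    rw [hv5]
    exact pv_s_range _ (pv_xor_small v4 rv4.1 rv4.2 _ hm3.1 hm3.2).1
      (pv_xor_small v4 rv4.1 rv4.2 _ hm3.1 hm3.2).2
  have hw : -16 ≤ PySem.Int.bxor v5 β0 ∧ PySem.Int.bxor v5 β0 ≤ 15 :=
    pv_xor_closure v5 (by omega) (by omega) β0 h0.1 h0.2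
  rw [pv_snorm _ hw.1 hw.2 β1 h1.1 h1.2,
      pv_band_xor v5 (by omega) (by omega) β0 h0.1 h0.2, pv_band_id v5 rv5.1 rv5.2]
  set u := pvS2get (PySem.Int.bxor (PySem.Int.bxor v5 (PySem.Int.band β0 15)) (PySem.Int.band β1 15)) with hu
  have ru : 0 ≤ u ∧ u < 16 := by
    rw [hu]
    have hx := pv_xor_small _ (pv_xor_small v5 rv5.1 rv5.2 _ hm0.1 hm0.2).1
      (pv_xor_small v5 rv5.1 rv5.2 _ hm0.1 hm0.2).2 _ hm1.1 hm1.2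
    exact pv_s_range _ hx.1 hx.2
  have hw2 : -16 ≤ PySem.Int.bxor u β2 ∧ PySem.Int.bxor u β2 ≤ 15 :=
    pv_xor_closure u (by omega) (by omega) β2 h2.1 h2.2
  rw [pv_band_xor _ hw2.1 hw2.2 β3 h3.1 h3.2,
      pv_band_xor u (by omega) (by omega) β2 h2.1 h2.2, pv_band_id u ru.1 ru.2]

-- fwd∘bwd = id and range of bwd (masked arguments)
theorem pv_fwd_bwd (m0 m1 m2 m3 : Int)
    (hm0 : 0 ≤ m0 ∧ m0 < 16) (hm1 : 0 ≤ m1 ∧ m1 < 16)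
    (hm2 : 0 ≤ m2 ∧ m2 < 16) (hm3 : 0 ≤ m3 ∧ m3 < 16)
    (y : Int) (hy : 0 ≤ y ∧ y < 16) :
    pvFwd m0 m1 m2 m3 (pvBwd m0 m1 m2 m3 y) = y ∧
    0 ≤ pvBwd m0 m1 m2 m3 y ∧ pvBwd m0 m1 m2 m3 y < 16 := by
  simp only [pvBwd]
  set t := PySem.Int.bxor (PySem.Int.bxor y m2) m3 with ht
  have rt : 0 ≤ t ∧ t < 16 := by
    rw [ht]
    exact pv_xor_small _ (pv_xor_small y hy.1 hy.2 m2 hm2.1 hm2.2).1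
      (pv_xor_small y hy.1 hy.2 m2 hm2.1 hm2.2).2 m3 hm3.1 hm3.2
  set x1 := PySem.Int.bxor (PySem.Int.bxor (pvSi t) m0) m1 with hx1
  have rw0 := pv_si_range t rt.1 rt.2
  have rx1 : 0 ≤ x1 ∧ x1 < 16 := by
    rw [hx1]
    exact pv_xor_small _ (pv_xor_small _ rw0.1 rw0.2 m0 hm0.1 hm0.2).1
      (pv_xor_small _ rw0.1 rw0.2 m0 hm0.1 hm0.2).2 m1 hm1.1 hm1.2
  set x2 := PySem.Int.bxor (pvSi x1) m3 with hx2
  have rs1 := pv_si_range x1 rx1.1 rx1.2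
  have rx2 : 0 ≤ x2 ∧ x2 < 16 := by
    rw [hx2]; exact pv_xor_small _ rs1.1 rs1.2 m3 hm3.1 hm3.2
  set x3 := PySem.Int.bxor (pvSi x2) m2 with hx3
  have rs2 := pv_si_range x2 rx2.1 rx2.2
  have rx3 : 0 ≤ x3 ∧ x3 < 16 := by
    rw [hx3]; exact pv_xor_small _ rs2.1 rs2.2 m2 hm2.1 hm2.2
  set x4 := PySem.Int.bxor (pvSi x3) m1 with hx4
  have rs3 := pv_si_range x3 rx3.1 rx3.2
  have rx4 : 0 ≤ x4 ∧ x4 < 16 := by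
    rw [hx4]; exact pv_xor_small _ rs3.1 rs3.2 m1 hm1.1 hm1.2
  have rs4 := pv_si_range x4 rx4.1 rx4.2
  refine ⟨?_, pv_xor_small _ rs4.1 rs4.2 m0 hm0.1 hm0.2⟩
  simp only [pvFwd]
  rw [pv_xor_cancel2 (pvSi x4) rs4.1 rs4.2 m0 hm0.1 hm0.2, pv_s_si x4 rx4.1 rx4.2,
      hx4, pv_xor_cancel2 (pvSi x3) rs3.1 rs3.2 m1 hm1.1 hm1.2, pv_s_si x3 rx3.1 rx3.2,
      hx3, pv_xor_cancel2 (pvSi x2) rs2.1 rs2.2 m2 hm2.1 hm2.2, pv_s_si x2 rx2.1 rx2.2,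
      hx2, pv_xor_cancel2 (pvSi x1) rs1.1 rs1.2 m3 hm3.1 hm3.2, pv_s_si x1 rx1.1 rx1.2,
      hx1, pv_xor_cancel4 (pvSi t) rw0.1 rw0.2 m0 hm0.1 hm0.2 m1 hm1.1 hm1.2,
      pv_s_si t rt.1 rt.2, ht, pv_xor_cancel4 y hy.1 hy.2 m2 hm2.1 hm2.2 m3 hm3.1 hm3.2]

-- bwd∘fwd = id and range of fwd (masked arguments)
theorem pv_bwd_fwd (m0 m1 m2 m3 : Int)
    (hm0 : 0 ≤ m0 ∧ m0 < 16) (hm1 : 0 ≤ m1 ∧ m1 < 16)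
    (hm2 : 0 ≤ m2 ∧ m2 < 16) (hm3 : 0 ≤ m3 ∧ m3 < 16)
    (b : Int) (hb : 0 ≤ b ∧ b < 16) :
    pvBwd m0 m1 m2 m3 (pvFwd m0 m1 m2 m3 b) = b ∧
    0 ≤ pvFwd m0 m1 m2 m3 b ∧ pvFwd m0 m1 m2 m3 b < 16 := by
  simp only [pvFwd]
  set v2 := pvS2get (PySem.Int.bxor b m0) with hv2
  have rv2 : 0 ≤ v2 ∧ v2 < 16 := by
    rw [hv2]
    exact pv_s_range _ (pv_xor_small b hb.1 hb.2 m0 hm0.1 hm0.2).1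
      (pv_xor_small b hb.1 hb.2 m0 hm0.1 hm0.2).2
  set v3 := pvS2get (PySem.Int.bxor v2 m1) with hv3
  have rv3 : 0 ≤ v3 ∧ v3 < 16 := by
    rw [hv3]
    exact pv_s_range _ (pv_xor_small v2 rv2.1 rv2.2 m1 hm1.1 hm1.2).1
      (pv_xor_small v2 rv2.1 rv2.2 m1 hm1.1 hm1.2).2
  set v4 := pvS2get (PySem.Int.bxor v3 m2) with hv4
  have rv4 : 0 ≤ v4 ∧ v4 < 16 := by
    rw [hv4]
    exact pv_s_range _ (pv_xor_small v3 rv3.1 rv3.2 m2 hm2.1 hm2.2).1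
      (pv_xor_small v3 rv3.1 rv3.2 m2 hm2.1 hm2.2).2
  set v5 := pvS2get (PySem.Int.bxor v4 m3) with hv5
  have rv5 : 0 ≤ v5 ∧ v5 < 16 := by
    rw [hv5]
    exact pv_s_range _ (pv_xor_small v4 rv4.1 rv4.2 m3 hm3.1 hm3.2).1
      (pv_xor_small v4 rv4.1 rv4.2 m3 hm3.1 hm3.2).2
  have hidx := pv_xor_small _ (pv_xor_small v5 rv5.1 rv5.2 m0 hm0.1 hm0.2).1
      (pv_xor_small v5 rv5.1 rv5.2 m0 hm0.1 hm0.2).2 m1 hm1.1 hm1.2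
  set u := pvS2get (PySem.Int.bxor (PySem.Int.bxor v5 m0) m1) with hu
  have ru : 0 ≤ u ∧ u < 16 := by rw [hu]; exact pv_s_range _ hidx.1 hidx.2
  refine ⟨?_, pv_xor_small _ (pv_xor_small u ru.1 ru.2 m2 hm2.1 hm2.2).1
      (pv_xor_small u ru.1 ru.2 m2 hm2.1 hm2.2).2 m3 hm3.1 hm3.2⟩
  simp only [pvBwd]
  rw [pv_xor_cancel4 u ru.1 ru.2 m2 hm2.1 hm2.2 m3 hm3.1 hm3.2, hu,
      pv_si_s _ hidx.1 hidx.2,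
      pv_xor_cancel4 v5 rv5.1 rv5.2 m0 hm0.1 hm0.2 m1 hm1.1 hm1.2, hv5,
      pv_si_s _ (pv_xor_small v4 rv4.1 rv4.2 m3 hm3.1 hm3.2).1
        (pv_xor_small v4 rv4.1 rv4.2 m3 hm3.1 hm3.2).2,
      pv_xor_cancel2 v4 rv4.1 rv4.2 m3 hm3.1 hm3.2, hv4,
      pv_si_s _ (pv_xor_small v3 rv3.1 rv3.2 m2 hm2.1 hm2.2).1
        (pv_xor_small v3 rv3.1 rv3.2 m2 hm2.1 hm2.2).2,
      pv_xor_cancel2 v3 rv3.1 rv3.2 m2 hm2.1 hm2.2, hv3,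
      pv_si_s _ (pv_xor_small v2 rv2.1 rv2.2 m1 hm1.1 hm1.2).1
        (pv_xor_small v2 rv2.1 rv2.2 m1 hm1.1 hm1.2).2,
      pv_xor_cancel2 v2 rv2.1 rv2.2 m1 hm1.1 hm1.2, hv2,
      pv_si_s _ (pv_xor_small b hb.1 hb.2 m0 hm0.1 hm0.2).1
        (pv_xor_small b hb.1 hb.2 m0 hm0.1 hm0.2).2,
      pv_xor_cancel2 b hb.1 hb.2 m0 hm0.1 hm0.2]

-- scatter-fold facts
theorem pv_scatter_len (g : Int → Int) (ys : List Int) (p : List Int) :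
    (ys.foldl (fun p y => PySem.List.pySetD p (g y) y) p).length = p.length := by
  induction ys generalizing p with
  | nil => rfl
  | cons a tl ih => simp [List.foldl, ih, PySem.List.length_pySetD]

theorem pv_scatter_hit (g : Int → Int) (j : Nat) (y0 : Int) :
    ∀ (ys : List Int) (p : List Int), (∀ y ∈ ys, 0 ≤ g y) → y0 ∈ ys → (g y0).toNat = j →
    j < p.length → (∀ y ∈ ys, (g y).toNat = j → y = y0) →
    (ys.foldl (fun p y => PySem.List.pySetD p (g y) y) p)[j]? = some y0 := by
  intro ys
  induction ys using List.reverseRecOn with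
  | nil => intro p _ hy _ _ _; simp at hy
  | append_singleton ys' a ih =>
    intro p hpos hy hg hj huniq
    rw [List.foldl_append, List.foldl_cons, List.foldl_nil]
    by_cases hcase : (g a).toNat = j
    · have ha : a = y0 := huniq a (by simp) hcase
      rw [PySem.List.pySetD_of_nonneg _ _ (hpos a (by simp)), hcase,
        List.getElem?_set_self (by rw [pv_scatter_len]; exact hj), ha]
    · have hy' : y0 ∈ ys' := by
        rcases List.mem_append.mp hy with h | h
        · exact h
        · exact absurd (List.mem_singleton.mp h ▸ hg) hcase
      rw [PySem.List.pySetD_of_nonneg _ _ (hpos a (by simp)),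
        List.getElem?_set_ne hcase,
        ih p (fun y hy => hpos y (by simp [hy])) hy' hg hj
          (fun y hy hh => huniq y (by simp [hy]) hh)]

-- ===== VERDICT (by name: the statement is the Claim_ definition above) =====
set_option maxRecDepth 8192 in
theorem lane_perm_from_signature_spec : Claim_equal_lane_perm_from_signature := by
  intro sig _ hpre
  obtain ⟨s0, s1, s2, s3⟩ := sig
  obtain ⟨hs0, hs1, hs2, hs3⟩ := hpre
  dsimp only at hs0 hs1 hs2 hs3
  have hm0 := pv_mask_range s0 hs0.1 hs0.2
  have hm1 := pv_mask_range s2 hs2.1 hs2.2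
  have hm2 := pv_mask_range s1 hs1.1 hs1.2
  have hm3 := pv_mask_range s3 hs3.1 hs3.2
  have hinv : (PySem.List.enumerate pvS2).foldl
      (fun inv iv => PySem.List.pySetD inv iv.2 iv.1) (List.replicate 16 (0 : Int)) = pvInv := by
    rfl
  have hBfun : lane_perm_from_signature_alt (s0, s1, s2, s3)
      = (PySem.List.pyRange 0 16 1).foldl
          (fun perm y => PySem.List.pySetD perm
            (pvBwd (PySem.Int.band s0 15) (PySem.Int.band s2 15)
                   (PySem.Int.band s1 15) (PySem.Int.band s3 15) y) y)
          (List.replicate 16 (0 : Int)) := by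
    simp only [lane_perm_from_signature_alt, pvBwd, pvSi]
    rw [hinv]
  unfold Spec_lane_perm_from_signature lane_perm_from_signature
  dsimp only
  rw [hBfun, PySem.List.foldl_append_singleton_eq_map, List.nil_append]
  apply List.ext_getElem?
  intro j
  by_cases hj : j < 16
  · rw [List.getElem?_map, PySem.List.getElem?_pyRange_one, if_pos (show j < ((16:Int) - 0).toNat by omega)]
    dsimp only [Option.map_some]
    rw [zero_add, pv_fA_eq s0 s2 s1 s3 (j : Int) hs0 hs2 hs1 hs3
        ⟨Int.natCast_nonneg j, by exact_mod_cast hj⟩,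
      pv_scatter_hit (fun y => pvBwd (PySem.Int.band s0 15) (PySem.Int.band s2 15)
          (PySem.Int.band s1 15) (PySem.Int.band s3 15) y) j
        (pvFwd (PySem.Int.band s0 15) (PySem.Int.band s2 15)
          (PySem.Int.band s1 15) (PySem.Int.band s3 15) (j : Int))
        (PySem.List.pyRange 0 16 1) (List.replicate 16 (0 : Int))
        ?_ ?_ ?_ (by simp only [List.length_replicate]; omega) ?_]
    · intro y hy
      rw [PySem.List.mem_pyRange_one] at hy
      exact (pv_fwd_bwd _ _ _ _ hm0 hm1 hm2 hm3 y ⟨hy.1, hy.2⟩).2.1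
    · rw [PySem.List.mem_pyRange_one]
      have := (pv_bwd_fwd _ _ _ _ hm0 hm1 hm2 hm3 (j : Int)
        ⟨Int.natCast_nonneg j, by exact_mod_cast hj⟩).2
      exact ⟨this.1, this.2⟩
    · beta_reduce
      rw [(pv_bwd_fwd _ _ _ _ hm0 hm1 hm2 hm3 (j : Int)
        ⟨Int.natCast_nonneg j, by exact_mod_cast hj⟩).1]
      exact Int.toNat_natCast j
    · intro y hy hh
      beta_reduce at hh
      rw [PySem.List.mem_pyRange_one] at hy
      have hfb := pv_fwd_bwd _ _ _ _ hm0 hm1 hm2 hm3 y ⟨hy.1, hy.2⟩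
      have : pvBwd (PySem.Int.band s0 15) (PySem.Int.band s2 15)
          (PySem.Int.band s1 15) (PySem.Int.band s3 15) y = (j : Int) := by omega
      rw [← hfb.1, this]
  · rw [List.getElem?_eq_none (by
        simp only [List.length_map, PySem.List.length_pyRange_one]; omega),
      List.getElem?_eq_none (by
        rw [pv_scatter_len]; simp only [List.length_replicate]; omega)]
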